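-- pv_equiv track=rewrite | github.com/jereneal20/competitive-programming | hackercup/2018-qual/interception.py | interception
-- ===== SOURCE A (Python) =====
-- def interception(polynomials):
--     init_pow = 0
--     for idx in range(0, len(polynomials)):
--         if init_pow == 0:
--             init_pow = 1
--         else:
--             init_pow = 0
--     if init_pow == 0:
--         return True
--     else:
--         return False
-- ===== SOURCE B (Python) =====
-- def interception(polynomials):
--     return len(polynomials) % 2 == 0
-- ===== Notes on version B (the rewrite author's own statement) =====
-- stated objective: idiomatic
-- what changed: Replaced the n-iteration flag-toggling loop with a closed-form parity test len(polynomials) % 2 == 0.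
import Mathlib
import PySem

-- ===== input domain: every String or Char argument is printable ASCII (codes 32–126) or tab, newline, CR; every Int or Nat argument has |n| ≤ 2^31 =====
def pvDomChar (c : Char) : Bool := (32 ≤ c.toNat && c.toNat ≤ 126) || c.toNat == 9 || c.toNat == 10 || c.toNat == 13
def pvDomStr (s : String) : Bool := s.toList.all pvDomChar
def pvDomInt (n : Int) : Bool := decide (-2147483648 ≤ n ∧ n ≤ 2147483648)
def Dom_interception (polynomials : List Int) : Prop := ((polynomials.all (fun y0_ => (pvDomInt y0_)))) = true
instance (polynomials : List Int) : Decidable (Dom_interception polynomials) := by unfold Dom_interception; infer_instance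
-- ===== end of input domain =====

-- B replaces A's flag-toggling loop with a closed-form parity test on the length (idiomatic).

-- ===== PORT A =====
-- literal transliteration: toggle init_pow once per element, then return init_pow == 0
def interception (polynomials : List Int) : Bool :=
  let init_pow : Int :=
    (PySem.List.pyRange 0 (polynomials.length : Int) 1).foldl
      (fun init_pow _idx => if init_pow == 0 then 1 else 0) 0
  if init_pow == 0 then true else false

-- ===== PORT B =====
def interception_alt (polynomials : List Int) : Bool :=
  PySem.Int.mod (polynomials.length : Int) 2 == 0

-- ===== PRECONDITION & SPEC =====
def Spec_interception (polynomials : List Int) (out : Bool) : Prop := out = interception_alt polynomials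
instance (polynomials : List Int) (out : Bool) : Decidable (Spec_interception polynomials out) := by unfold Spec_interception; infer_instance

-- ===== CLAIM (what is proved, stated in full; the proofs are below) =====
def Claim_equal_interception : Prop := ∀ (polynomials : List Int), Dom_interception polynomials → Spec_interception polynomials (interception polynomials)

-- ===== LEMMAS AND PROOFS =====

-- the toggle fold over range(0,n) ends at n % 2
lemma interception_toggle (n : ℕ) :
    (PySem.List.pyRange 0 (n : Int) 1).foldl
      (fun init_pow _idx => if init_pow == 0 then (1:Int) else 0) 0 = (n : Int) % 2 := by
  induction n with
  | zero => decide
  | succ k ih =>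
    rw [show ((k+1 : ℕ) : Int) = (k : Int) + 1 by push_cast; ring,
        PySem.List.pyRange_one_succ_right (by positivity), List.foldl_append, ih]
    simp only [List.foldl]
    rcases Int.emod_two_eq_zero_or_one k with h | h <;> simp [h] <;> omega

-- ===== VERDICT (by name: the statement is the Claim_ definition above) =====
theorem interception_spec : Claim_equal_interception := by
  intro xs _
  unfold Spec_interception interception interception_alt
  rw [interception_toggle]
  have : PySem.Int.mod (xs.length : Int) 2 = (xs.length : Int) % 2 := by
    simp [PySem.Int.mod, Int.fmod_eq_emod]
  rw [this]
  rcases Int.emod_two_eq_zero_or_one xs.length with h | h <;> simp [h]
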